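-- pv_equiv track=rewrite | github.com/thekure/ArcRecovery | Model/common.py | get_parent_module
-- ===== SOURCE A (Python) =====
-- def get_parent_module(module_name):
--     """Extract the parent module name from a dotted module path.
--
--     For example:
--     - 'app.components' -> 'app'
--     - 'app' -> ''  (a top-level module has no parent)
--     """
--     path = module_name.split('.')
--     parent_depth = len(path) - 1
--     parent_path = ""
--
--     for i in range(parent_depth):
--         if i == parent_depth - 1:
--             parent_path += path[i]
--         else:
--             parent_path += path[i] + "."
--
--     return parent_path
-- ===== SOURCE B (Python) =====
-- def get_parent_module(module_name):
--     """Return everything before the last '.' in a dotted module path ('' if none)."""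
--     i = module_name.rfind('.')
--     return module_name[:i] if i >= 0 else ''
-- ===== Notes on version B (the rewrite author's own statement) =====
-- stated objective: simpler
-- what changed: Instead of splitting the path into segments and rebuilding the parent by looping over indices and re-appending each segment plus a separator, B locates the last dot with rfind and returns the prefix before it (empty if there is no dot); no segment list and no accumulator are maintained.
import Mathlib
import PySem

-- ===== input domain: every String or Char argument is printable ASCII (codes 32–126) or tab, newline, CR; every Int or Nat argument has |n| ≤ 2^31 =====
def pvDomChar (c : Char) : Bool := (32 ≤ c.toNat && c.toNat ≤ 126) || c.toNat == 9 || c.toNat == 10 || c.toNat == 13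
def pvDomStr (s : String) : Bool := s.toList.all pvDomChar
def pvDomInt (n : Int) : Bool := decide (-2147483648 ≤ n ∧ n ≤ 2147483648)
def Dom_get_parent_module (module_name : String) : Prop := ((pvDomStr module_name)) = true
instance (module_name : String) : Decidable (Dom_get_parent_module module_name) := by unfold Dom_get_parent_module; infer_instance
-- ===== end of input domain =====

-- B replaces A's split-into-segments-and-rebuild loop with a single rfind of the
-- last '.' and a prefix slice; equivalence of RETURN values is proved for all strings.

-- ===== PORT A =====
-- literal transliteration of A: split on '.', then loop i over range(len(path)-1)
-- appending path[i] (plus '.' except for the last appended segment).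
-- (pyGet? … ).getD [] : the loop's indices are always in range, so the default is never taken.
def get_parent_module (module_name : String) : String :=
  let path : List (List Char) := PySem.Chars.splitOn module_name.toList ['.']
  let parent_depth : Int := (path.length : Int) - 1
  let parent_path : List Char :=
    (PySem.List.pyRange 0 parent_depth 1).foldl
      (fun acc i =>
        if i = parent_depth - 1 then acc ++ (PySem.List.pyGet? path i).getD []
        else acc ++ (PySem.List.pyGet? path i).getD [] ++ ['.'])
      []
  String.ofList parent_path

-- ===== PORT B =====
-- literal transliteration of Source B: i = module_name.rfind('.'); module_name[:i] if i >= 0 else ''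
def get_parent_module_alt (module_name : String) : String :=
  let i : Int := PySem.Str.rfind module_name "."
  if 0 ≤ i then PySem.Str.slice module_name none (some i) else ""

-- ===== PRECONDITION & SPEC =====
def Spec_get_parent_module (module_name : String) (out : String) : Prop := out = get_parent_module_alt module_name
instance (module_name : String) (out : String) : Decidable (Spec_get_parent_module module_name out) := by unfold Spec_get_parent_module; infer_instance

-- ===== CLAIM (what is proved, stated in full; the proofs are below) =====
def Claim_equal_get_parent_module : Prop := ∀ (module_name : String), Dom_get_parent_module module_name → Spec_get_parent_module module_name (get_parent_module module_name)

-- ===== LEMMAS AND PROOFS =====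

-- Reference single-character splitter: pvSplit c pre l prepends the pending prefix
-- `pre` to the first segment of l split at c.
def pvSplit (c : Char) : List Char → List Char → List (List Char)
  | pre, [] => [pre]
  | pre, x :: rest => if x = c then pre :: pvSplit c [] rest else pvSplit c (pre ++ [x]) rest

theorem pvSplit_ne_nil (c : Char) (pre l : List Char) : pvSplit c pre l ≠ [] := by
  induction l generalizing pre with
  | nil => simp [pvSplit]
  | cons x rest ih => by_cases h : x = c <;> simp [pvSplit, h, ih]

-- splitOn with a one-character separator IS pvSplit
theorem splitOn_go_eq_pvSplit (c : Char) :
    ∀ (fuel : Nat) (l cur : List Char) (acc : List (List Char)), l.length < fuel →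
      PySem.Chars.splitOn.go [c] fuel l cur acc = acc.reverse ++ pvSplit c cur.reverse l := by
  intro fuel
  induction fuel with
  | zero => intro l cur acc h; omega
  | succ n ih =>
    intro l cur acc h
    cases l with
    | nil => simp [PySem.Chars.splitOn.go, pvSplit]
    | cons x rest =>
      by_cases hx : x = c
      · subst hx
        have hpre : List.isPrefixOf [x] (x :: rest) = true := by simp [List.isPrefixOf]
        simp only [PySem.Chars.splitOn.go, hpre, if_true]
        have hd : List.drop [x].length (x :: rest) = rest := by simp
        rw [hd, ih rest [] (cur.reverse :: acc) (by simpa using Nat.lt_of_succ_lt_succ h)]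
        simp [pvSplit]
      · have hpre : List.isPrefixOf [c] (x :: rest) = false := by
          simp [List.isPrefixOf]
          exact fun hh => hx hh.symm
        simp only [PySem.Chars.splitOn.go, hpre, Bool.false_eq_true, if_false]
        rw [ih rest (x :: cur) acc (by simpa using Nat.lt_of_succ_lt_succ h)]
        simp [pvSplit, hx]

theorem splitOn_eq_pvSplit (c : Char) (s : List Char) :
    PySem.Chars.splitOn s [c] = pvSplit c [] s := by
  have := splitOn_go_eq_pvSplit c (s.length + 1) s [] [] (by omega)
  simpa [PySem.Chars.splitOn] using this

-- pvSplit of a separator-free string is a single segment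
theorem pvSplit_no_sep (c : Char) (pre s : List Char) (h : c ∉ s) :
    pvSplit c pre s = [pre ++ s] := by
  induction s generalizing pre with
  | nil => simp [pvSplit]
  | cons x rest ih =>
    have hx : x ≠ c := fun hh => h (hh ▸ List.mem_cons_self)
    simp only [pvSplit, if_neg hx]
    rw [ih (pre ++ [x]) (fun hm => h (List.mem_cons_of_mem _ hm))]
    simp

-- splitting across a separator concatenates the two splits
theorem pvSplit_append (c : Char) (pre a v : List Char) :
    pvSplit c pre (a ++ c :: v) = pvSplit c pre a ++ pvSplit c [] v := by
  induction a generalizing pre with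
  | nil => simp [pvSplit]
  | cons x rest ih =>
    by_cases hx : x = c
    · subst hx; simp [pvSplit, ih]
    · simp [pvSplit, hx, ih]

-- joining the split back with the separator restores the string
theorem join_pvSplit (c : Char) (pre s : List Char) :
    PySem.Chars.join [c] (pvSplit c pre s) = pre ++ s := by
  induction s generalizing pre with
  | nil => simp [pvSplit, PySem.Chars.join_singleton]
  | cons x rest ih =>
    by_cases hx : x = c
    · subst hx
      simp only [pvSplit, if_true]
      obtain ⟨q, t, hqt⟩ : ∃ q t, pvSplit x [] rest = q :: t := by
        cases hsp : pvSplit x [] rest with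
        | nil => exact absurd hsp (pvSplit_ne_nil x [] rest)
        | cons q t => exact ⟨q, t, rfl⟩
      rw [hqt, PySem.Chars.join_cons_cons, ← hqt, ih]
      simp
    · simp only [pvSplit, if_neg hx]
      rw [ih (pre ++ [x])]
      simp

-- A's loop, after rewriting to a flatMap over List.range, equals join '.' of dropLast
theorem flatMap_range_eq_join (path : List (List Char)) :
    (List.range (path.length - 1)).flatMap
      (fun i => if i = path.length - 2 then path.getD i [] else path.getD i [] ++ ['.'])
    = PySem.Chars.join ['.'] path.dropLast := by
  induction path with
  | nil => simp [PySem.Chars.join_nil]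
  | cons p rest ih =>
    cases rest with
    | nil => simp [PySem.Chars.join_nil]
    | cons q t =>
      have hlen : (p :: q :: t).length - 1 = t.length + 1 := by simp
      rw [hlen, List.range_succ_eq_map, List.flatMap_cons, List.flatMap_map]
      have hfun : ∀ i ∈ List.range t.length,
          (fun i => if i = (p :: q :: t).length - 2 then (p :: q :: t).getD i []
                    else (p :: q :: t).getD i [] ++ ['.']) (Nat.succ i)
        = (fun i => if i = (q :: t).length - 2 then (q :: t).getD i []
                    else (q :: t).getD i [] ++ ['.']) i := by
        intro i hi_mem
        have hilt : i < t.length := List.mem_range.mp hi_mem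
        dsimp only
        have hcond : (Nat.succ i = (p :: q :: t).length - 2) ↔ (i = (q :: t).length - 2) := by
          simp only [List.length_cons]
          omega
        by_cases hi : i = (q :: t).length - 2
        · rw [if_pos (hcond.mpr hi), if_pos hi]; rfl
        · rw [if_neg (fun hh => hi (hcond.mp hh)), if_neg hi]; rfl
      rw [List.flatMap_congr hfun]
      have hrange : t.length = (q :: t).length - 1 := by simp
      rw [hrange, ih]
      cases t with
      | nil =>
        have h00 : ((0 : Nat) = (p :: q :: ([] : List (List Char))).length - 2) := by simp
        rw [if_pos h00]
        simp [PySem.Chars.join_singleton, PySem.Chars.join_nil]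
      | cons r u =>
        have h0 : ¬ ((0 : Nat) = (p :: q :: r :: u).length - 2) := by simp
        rw [if_neg h0]
        have hgd : (p :: q :: r :: u).getD 0 [] = p := rfl
        rw [hgd]
        have hdl : (p :: q :: r :: u).dropLast = p :: (q :: r :: u).dropLast := by simp
        rw [hdl]
        obtain ⟨w, ws, hw⟩ : ∃ w ws, (q :: r :: u).dropLast = w :: ws := by
          cases hdd : (q :: r :: u).dropLast with
          | nil => simp at hdd
          | cons w ws => exact ⟨w, ws, rfl⟩
        rw [hw, PySem.Chars.join_cons_cons]

-- A's loop over pyRange, for a nonempty path, equals join '.' of dropLast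
theorem foldA_eq_join (path : List (List Char)) (hne : path ≠ []) :
    (PySem.List.pyRange 0 ((path.length : Int) - 1) 1).foldl
      (fun acc i => if i = ((path.length : Int) - 1) - 1 then acc ++ (PySem.List.pyGet? path i).getD []
                    else acc ++ (PySem.List.pyGet? path i).getD [] ++ ['.']) []
    = PySem.Chars.join ['.'] path.dropLast := by
  obtain ⟨n, hn⟩ : ∃ n : Nat, path.length = n + 1 := by
    cases path with
    | nil => exact absurd rfl hne
    | cons a b => exact ⟨b.length, by simp⟩
  have hpd : ((path.length : Int) - 1) = ((n : Int)) := by rw [hn]; push_cast; ring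
  rw [hpd, PySem.List.pyRange_zero_natCast, List.foldl_map]
  have hcongr : ∀ (acc : List Char), ∀ k ∈ List.range n,
      (if ((k : Nat) : Int) = (n : Int) - 1 then acc ++ (PySem.List.pyGet? path ((k : Nat) : Int)).getD []
       else acc ++ (PySem.List.pyGet? path ((k : Nat) : Int)).getD [] ++ ['.'])
      = acc ++ (if k = path.length - 2 then path.getD k [] else path.getD k [] ++ ['.']) := by
    intro acc k hk
    have hklt : k < n := List.mem_range.mp hk
    have hget : (PySem.List.pyGet? path ((k : Nat) : Int)).getD [] = path.getD k [] := by
      rw [PySem.List.pyGet?_natCast]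
      simp [List.getD]
    have hcond : (((k : Nat) : Int) = (n : Int) - 1) ↔ (k = path.length - 2) := by
      rw [hn]; omega
    by_cases hcase : k = path.length - 2
    · rw [if_pos (hcond.mpr hcase), if_pos hcase, hget]
    · rw [if_neg (fun hh => hcase (hcond.mp hh)), if_neg hcase, hget, List.append_assoc]
  rw [PySem.List.foldl_congr_mem _ _
      (fun acc k => acc ++ (if k = path.length - 2 then path.getD k [] else path.getD k [] ++ ['.'])) _
      hcongr]
  rw [PySem.List.foldl_append_eq_flatMap
    (g := fun k => if k = path.length - 2 then path.getD k [] else path.getD k [] ++ ['.'])]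
  simp only [List.nil_append]
  rw [show n = path.length - 1 by omega, flatMap_range_eq_join path]

-- A computed on the char list: it equals join '.' of the dropLast of the split
theorem portA_chars (s : List Char) :
    (get_parent_module (String.ofList s)).toList
      = PySem.Chars.join ['.'] (PySem.Chars.splitOn s ['.']).dropLast := by
  have hne : PySem.Chars.splitOn s ['.'] ≠ [] := by
    rw [splitOn_eq_pvSplit]
    exact pvSplit_ne_nil _ _ _
  simp only [get_parent_module, String.toList_ofList]
  exact foldA_eq_join _ hne

-- rfind '.' returns -1 on a dot-free string …
theorem rfind_go_no_dot (s : List Char) (h : ('.' : Char) ∉ s) :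
    ∀ j : Nat, PySem.Chars.rfind.go s ['.'] j = -1 := by
  intro j
  induction j with
  | zero =>
    have : List.isPrefixOf ['.'] s = false := by
      cases s with
      | nil => rfl
      | cons x rest =>
        have : x ≠ '.' := fun hh => h (hh ▸ List.mem_cons_self)
        simp [List.isPrefixOf]
        intro hh
        exact absurd hh.symm this
    simp [PySem.Chars.rfind.go, this]
  | succ j ih =>
    have : List.isPrefixOf ['.'] (List.drop (j + 1) s) = false := by
      cases hd : List.drop (j + 1) s with
      | nil => rfl
      | cons x rest =>
        have hx : x ∈ s := by
          have : x ∈ List.drop (j + 1) s := by rw [hd]; exact List.mem_cons_self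
          exact List.mem_of_mem_drop this
        have : x ≠ '.' := fun hh => h (hh ▸ hx)
        simp [List.isPrefixOf]
        intro hh
        exact absurd hh.symm this
    simp only [PySem.Chars.rfind.go, this, Bool.false_eq_true, if_false]
    exact ih

theorem rfind_no_dot (s : List Char) (h : ('.' : Char) ∉ s) :
    PySem.Chars.rfind s ['.'] = -1 := by
  unfold PySem.Chars.rfind
  exact rfind_go_no_dot s h _

-- … and the index of the last dot when the string is u ++ '.' :: v with no dot in v
theorem rfind_go_last_dot (u v : List Char) (hv : ('.' : Char) ∉ v) :
    ∀ k : Nat, PySem.Chars.rfind.go (u ++ '.' :: v) ['.'] (u.length + k) = (u.length : Int) := by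
  intro k
  induction k with
  | zero =>
    rw [Nat.add_zero]
    rcases hu : u.length with _ | m
    · have hu' : u = [] := List.eq_nil_of_length_eq_zero hu
      subst hu'
      have hpre : List.isPrefixOf ['.'] (([] : List Char) ++ '.' :: v) = true := by
        simp [List.isPrefixOf]
      simp [PySem.Chars.rfind.go]
    · have hpre : List.isPrefixOf ['.'] (List.drop (m + 1) (u ++ '.' :: v)) = true := by
        rw [← hu, List.drop_left]
        simp [List.isPrefixOf]
      simp [PySem.Chars.rfind.go, hpre]
  | succ k ih =>
    have hdrop : List.drop (u.length + k + 1) (u ++ '.' :: v) = List.drop k v := by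
      rw [show u.length + k + 1 = u.length + (k + 1) by ring, List.drop_length_add_append]
      simp
    have hpre : List.isPrefixOf ['.'] (List.drop (u.length + k + 1) (u ++ '.' :: v)) = false := by
      rw [hdrop]
      cases hd : List.drop k v with
      | nil => rfl
      | cons x rest =>
        have hx : x ∈ v := List.mem_of_mem_drop (by rw [hd]; exact List.mem_cons_self)
        have hxd : x ≠ '.' := fun hh => hv (hh ▸ hx)
        simp [List.isPrefixOf]
        exact fun hh => hxd hh.symm
    rw [show u.length + (k + 1) = (u.length + k) + 1 by ring]
    simp only [PySem.Chars.rfind.go, hpre, Bool.false_eq_true, if_false]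
    exact ih

theorem rfind_last_dot (u v : List Char) (hv : ('.' : Char) ∉ v) :
    PySem.Chars.rfind (u ++ '.' :: v) ['.'] = (u.length : Int) := by
  unfold PySem.Chars.rfind
  have hlen : (u ++ '.' :: v).length = u.length + (v.length + 1) := by simp
  rw [hlen]
  exact rfind_go_last_dot u v hv (v.length + 1)

-- every string either has no dot or decomposes as u ++ '.' :: v with no dot in v
theorem last_dot_decomp (s : List Char) :
    ('.' : Char) ∉ s ∨ ∃ u v, s = u ++ '.' :: v ∧ ('.' : Char) ∉ v := by
  induction s using List.reverseRecOn with
  | nil => exact Or.inl (by simp)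
  | append_singleton ys x ih =>
    by_cases hx : x = '.'
    · exact Or.inr ⟨ys, [], by simp [hx], by simp⟩
    · cases ih with
      | inl h =>
        refine Or.inl ?_
        simp only [List.mem_append, List.mem_singleton]
        rintro (hh | hh)
        · exact h hh
        · exact hx hh.symm
      | inr h =>
        obtain ⟨u, v, hs, hv⟩ := h
        refine Or.inr ⟨u, v ++ [x], by simp [hs], ?_⟩
        simp only [List.mem_append, List.mem_singleton]
        rintro (hh | hh)
        · exact hv hh
        · exact hx hh.symm

-- ===== VERDICT (by name: the statement is the Claim_ definition above) =====
theorem get_parent_module_spec : Claim_equal_get_parent_module := by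
  intro module_name _
  unfold Spec_get_parent_module
  obtain ⟨s, rfl⟩ : ∃ s : List Char, module_name = String.ofList s := ⟨module_name.toList, by simp⟩
  cases last_dot_decomp s with
  | inl h =>
    -- no dot: A builds the empty parent path, B takes the rfind = -1 branch
    apply String.toList_inj.mp
    rw [portA_chars]
    have hB : get_parent_module_alt (String.ofList s) = "" := by
      unfold get_parent_module_alt
      rw [PySem.Str.rfind_eq]
      simp only [String.toList_ofList]
      rw [show ("." : String).toList = ['.'] from rfl, rfind_no_dot s h]
      norm_num
    rw [hB]
    rw [splitOn_eq_pvSplit, pvSplit_no_sep _ _ _ h]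
    simp [PySem.Chars.join_nil]
  | inr h =>
    obtain ⟨u, v, rfl, hv⟩ := h
    apply String.toList_inj.mp
    rw [portA_chars]
    have hB : (get_parent_module_alt (String.ofList (u ++ '.' :: v))).toList = u := by
      unfold get_parent_module_alt
      rw [PySem.Str.rfind_eq]
      simp only [String.toList_ofList]
      rw [show ("." : String).toList = ['.'] from rfl, rfind_last_dot u v hv]
      rw [if_pos (Int.natCast_nonneg u.length)]
      rw [PySem.Str.toList_slice, String.toList_ofList, PySem.Chars.slice_eq_listSlice]
      rw [PySem.List.slice_to_natCast]
      simp
    rw [hB]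
    rw [splitOn_eq_pvSplit, pvSplit_append, pvSplit_no_sep _ _ _ hv]
    have hv0 : pvSplit '.' [] u ++ [[] ++ v] = pvSplit '.' [] u ++ [v] := by simp
    rw [hv0, List.dropLast_concat, join_pvSplit]
    simp
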